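-- pv_equiv track=rewrite | github.com/masschallenge/impact-api | web/impact/impact/v1/views/utils.py | coalesce_dictionaries
-- ===== SOURCE A (Python) =====
-- def coalesce_dictionaries(data, merge_field="id"):
--     """Takes a sequence of dictionaries, merges those that share the
--     same merge_field, and returns a list of resulting dictionaries"""
--     result = {}
--     for datum in data:
--         merge_id = datum[merge_field]
--         item = result.get(merge_id, {})
--         item.update(datum)
--         result[merge_id] = item
--     return result.values()
-- ===== SOURCE B (Python) =====
-- def coalesce_dictionaries(data, merge_field="id"):
--     """Group-then-merge: index the dicts by their merge_field value in one
--     pass, then fold .update over each group to build the merged dicts."""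
--     groups = {}
--     for datum in data:
--         groups.setdefault(datum[merge_field], []).append(datum)
--     result = {}
--     for merge_id, group in groups.items():
--         merged = {}
--         for datum in group:
--             merged.update(datum)
--         result[merge_id] = merged
--     return result.values()
-- ===== Notes on version B (the rewrite author's own statement) =====
-- stated objective: alternative
-- what changed: Replaces A's single accumulate-as-you-go scan (get-or-default, update, re-store per datum) with a two-pass index-then-reduce shape: first group the dicts by merge_field value, then fold update over each group into a fresh dict.
import Mathlib
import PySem

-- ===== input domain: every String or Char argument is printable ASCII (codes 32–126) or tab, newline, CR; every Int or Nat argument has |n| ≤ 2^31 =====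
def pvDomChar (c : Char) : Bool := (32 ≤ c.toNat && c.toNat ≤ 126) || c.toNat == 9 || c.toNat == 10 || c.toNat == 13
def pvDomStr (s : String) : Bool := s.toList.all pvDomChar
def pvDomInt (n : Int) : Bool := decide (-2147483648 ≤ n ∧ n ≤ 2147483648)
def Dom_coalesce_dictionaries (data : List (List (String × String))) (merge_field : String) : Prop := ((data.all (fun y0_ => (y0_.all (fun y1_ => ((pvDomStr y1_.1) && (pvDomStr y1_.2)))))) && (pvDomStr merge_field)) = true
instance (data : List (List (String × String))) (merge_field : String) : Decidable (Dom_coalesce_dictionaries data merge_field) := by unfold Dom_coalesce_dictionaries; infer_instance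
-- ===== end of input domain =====

-- B replaces A's accumulate-as-you-go scan by a two-pass group-then-merge decomposition (alternative, same cost).

-- datum[merge_field] on a dict literal: first-match lookup ("" is never read inside Pre_, where the key is present)
def pvKeyOf (merge_field : String) (datum : List (String × String)) : String :=
  (PySem.Dict.mk datum).getD merge_field ""

-- ===== PORT A =====
def coalesce_dictionaries (data : List (List (String × String))) (merge_field : String) : List (List (String × String)) :=
  let result : PySem.Dict String (PySem.Dict String String) :=
    data.foldl (fun result datum =>
      let merge_id := pvKeyOf merge_field datum
      let item := result.getD merge_id PySem.Dict.empty
      let item := PySem.Dict.update item datum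
      result.insert merge_id item) PySem.Dict.empty
  result.values.map PySem.Dict.items

-- ===== PORT B =====
def coalesce_dictionaries_alt (data : List (List (String × String))) (merge_field : String) : List (List (String × String)) :=
  let groups : PySem.Dict String (List (List (String × String))) :=
    data.foldl (fun g datum =>
      g.modify (pvKeyOf merge_field datum) [] (· ++ [datum])) PySem.Dict.empty
  let result : PySem.Dict String (PySem.Dict String String) :=
    groups.items.foldl (fun res kg =>
      res.insert kg.1 (kg.2.foldl (fun merged datum => PySem.Dict.update merged datum) PySem.Dict.empty))
      PySem.Dict.empty
  result.values.map PySem.Dict.items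

-- ===== PRECONDITION & SPEC =====
-- Pre_ excludes exactly the inputs where some datum lacks the merge_field key, on which A raises KeyError.
def Pre_coalesce_dictionaries (data : List (List (String × String))) (merge_field : String) : Prop :=
  data.all (fun d => d.any (fun kv => kv.1 == merge_field)) = true
instance (data : List (List (String × String))) (merge_field : String) : Decidable (Pre_coalesce_dictionaries data merge_field) := by unfold Pre_coalesce_dictionaries; infer_instance

def pvWitness_coalesce_dictionaries : (List (List (String × String))) × String :=
  ([[("id", "1"), ("a", "x")], [("id", "2")], [("id", "1"), ("b", "y")]], "id")

def Spec_coalesce_dictionaries (data : List (List (String × String))) (merge_field : String) (out : List (List (String × String))) : Prop := out = coalesce_dictionaries_alt data merge_field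
instance (data : List (List (String × String))) (merge_field : String) (out : List (List (String × String))) : Decidable (Spec_coalesce_dictionaries data merge_field out) := by unfold Spec_coalesce_dictionaries; infer_instance

-- ===== CLAIM (what is proved, stated in full; the proofs are below) =====
def Claim_equal_coalesce_dictionaries : Prop := ∀ (data : List (List (String × String))) (merge_field : String), Dom_coalesce_dictionaries data merge_field → Pre_coalesce_dictionaries data merge_field → Spec_coalesce_dictionaries data merge_field (coalesce_dictionaries data merge_field)

-- ===== LEMMAS AND PROOFS =====

-- A's running dict, read at one key k: the merged dict for k is the update-fold over exactly the data with key k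
theorem pvA_getD (mf : String) (data : List (List (String × String)))
    (r : PySem.Dict String (PySem.Dict String String)) (k : String) :
    ((data.foldl (fun result datum =>
        result.insert (pvKeyOf mf datum)
          (PySem.Dict.update (result.getD (pvKeyOf mf datum) PySem.Dict.empty) datum)) r).getD k PySem.Dict.empty)
      = (data.filter (fun d => pvKeyOf mf d == k)).foldl
          (fun merged datum => PySem.Dict.update merged datum) (r.getD k PySem.Dict.empty) := by
  induction data generalizing r with
  | nil => rfl
  | cons d l ih =>
    simp only [List.foldl_cons, List.filter_cons]
    rw [ih]
    by_cases h : pvKeyOf mf d = k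
    · simp [h, PySem.Dict.getD_insert]
    · simp [h, PySem.Dict.getD_insert, Ne.symm h]

-- B's grouping dict, read at one key k: the group is exactly the data with key k
theorem pvB_groups_getD (mf : String) (data : List (List (String × String))) (k : String) :
    ((data.foldl (fun g datum => g.modify (pvKeyOf mf datum) [] (· ++ [datum]))
        (PySem.Dict.empty : PySem.Dict String (List (List (String × String))))).getD k [])
      = data.filter (fun d => pvKeyOf mf d == k) := by
  have h := PySem.Dict.getD_foldl_modify_append
      (l := data.map (fun d => (pvKeyOf mf d, d)))
      (d := (PySem.Dict.empty : PySem.Dict String (List (List (String × String))))) (c := k)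
  rw [List.foldl_map] at h
  rw [h, List.filter_map, List.map_map]
  simp [Function.comp_def]

theorem coalesce_agree (data : List (List (String × String))) (mf : String) :
    coalesce_dictionaries data mf = coalesce_dictionaries_alt data mf := by
  simp only [coalesce_dictionaries, coalesce_dictionaries_alt]
  set key := pvKeyOf mf with hkey
  set merge : List (List (String × String)) → PySem.Dict String String :=
    fun grp => grp.foldl (fun merged datum => PySem.Dict.update merged datum) PySem.Dict.empty with hmerge
  set groups := data.foldl (fun g datum => g.modify (key datum) [] (· ++ [datum]))
      (PySem.Dict.empty : PySem.Dict String (List (List (String × String)))) with hgroups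
  set adict := data.foldl (fun result datum =>
      result.insert (key datum)
        (PySem.Dict.update (result.getD (key datum) PySem.Dict.empty) datum))
      (PySem.Dict.empty : PySem.Dict String (PySem.Dict String String)) with hadict
  -- nodup keys on both sides
  have hndA : adict.keys.Nodup := by
    rw [hadict]
    exact PySem.Dict.nodup_keys_foldl_insert_key data key _ _ PySem.Dict.nodup_keys_empty
  have hndG : groups.keys.Nodup := by
    rw [hgroups]
    exact PySem.Dict.nodup_keys_foldl_modify_key data key [] _ _ PySem.Dict.nodup_keys_empty
  -- B's result dict: fresh distinct inserts append, so its items are groups' items, merged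
  have hres : (groups.items.foldl (fun res kg => res.insert kg.1 (merge kg.2))
      (PySem.Dict.empty : PySem.Dict String (PySem.Dict String String))).items
      = groups.items.map (fun kg => (kg.1, merge kg.2)) := by
    have := PySem.Dict.items_foldl_insert_fresh (l := groups.items) (k := Prod.fst)
      (v := fun kg => merge kg.2)
      (d := (PySem.Dict.empty : PySem.Dict String (PySem.Dict String String)))
      (by intro a _; exact PySem.Dict.contains_empty a.1) hndG
    simpa using this
  -- equal keys
  have hkeys : adict.keys = groups.keys := by
    rw [hadict, hgroups]
    rw [PySem.Dict.keys_foldl_insert_key data key _ _, PySem.Dict.keys_foldl_modify_key data key [] _ _]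
    rfl
  -- equal items
  have hitems : adict.items = (groups.items.foldl (fun res kg => res.insert kg.1 (merge kg.2))
      (PySem.Dict.empty : PySem.Dict String (PySem.Dict String String))).items := by
    rw [hres, PySem.Dict.items_eq_map_keys adict hndA PySem.Dict.empty,
        PySem.Dict.items_eq_map_keys groups hndG [], List.map_map, hkeys]
    refine List.map_congr_left (fun k _ => ?_)
    simp only [Function.comp]
    rw [hadict, pvA_getD mf data PySem.Dict.empty k]
    rw [show groups.getD k [] = data.filter (fun d => key d == k) from pvB_groups_getD mf data k]
    simp [hmerge, PySem.Dict.getD_empty]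
    rw [hkey]
  simp only [PySem.Dict.values]
  rw [hitems]

-- ===== VERDICT (by name: the statement is the Claim_ definition above) =====
theorem coalesce_dictionaries_spec : Claim_equal_coalesce_dictionaries := by
  intro data mf _ _
  unfold Spec_coalesce_dictionaries
  exact coalesce_agree data mf
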